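-- pv_equiv track=rewrite | github.com/Aura-healthcare/ecg_seizure_detection_benchmarks | src/projet_CS/detection_algorithms/vandercasteele_clean.py | true_seizs
-- ===== SOURCE A (Python) =====
-- def true_seizs(features_list,seizs):
--     '''
--
--     '''
--     res=[0 for _ in range(len(seizs))]
--     for i in range(len(seizs)):
--         val,interv=seizs[i]
--         if val==1:
--             for j in range(len(seizs)):
--                 val2,interv2=seizs[j]
--                 if interv2==interv and val2==1 and j!=i:
--                     if features_list[i][2]-features_list[i][1]<features_list[j][2]-features_list[j][1]:
--                         break
--
--                     res[i]=1
--     return res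
-- ===== SOURCE B (Python) =====
-- def true_seizs(features_list, seizs):
--     groups = {}
--     for i, (val, interv) in enumerate(seizs):
--         if val == 1:
--             groups.setdefault(interv, []).append(i)
--     res = []
--     for i, (val, interv) in enumerate(seizs):
--         flag = 0
--         if val == 1:
--             g = groups[interv]
--             if len(g) > 1:
--                 other = g[1] if g[0] == i else g[0]
--                 if features_list[other][2] - features_list[other][1] <= features_list[i][2] - features_list[i][1]:
--                     flag = 1
--         res.append(flag)
--     return res
-- ===== Notes on version B (the rewrite author's own statement) =====
-- stated objective: alternative
-- what changed: Replaces A's nested rescan of all seizure pairs (with an early break) by a single dict pass that groups flagged indices per interval, after which each flagged segment is compared only against the smallest other index of its group; worst-case cost drops from O(n^2) to O(n), though A's early break makes the two comparable on typical data.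
import Mathlib
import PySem

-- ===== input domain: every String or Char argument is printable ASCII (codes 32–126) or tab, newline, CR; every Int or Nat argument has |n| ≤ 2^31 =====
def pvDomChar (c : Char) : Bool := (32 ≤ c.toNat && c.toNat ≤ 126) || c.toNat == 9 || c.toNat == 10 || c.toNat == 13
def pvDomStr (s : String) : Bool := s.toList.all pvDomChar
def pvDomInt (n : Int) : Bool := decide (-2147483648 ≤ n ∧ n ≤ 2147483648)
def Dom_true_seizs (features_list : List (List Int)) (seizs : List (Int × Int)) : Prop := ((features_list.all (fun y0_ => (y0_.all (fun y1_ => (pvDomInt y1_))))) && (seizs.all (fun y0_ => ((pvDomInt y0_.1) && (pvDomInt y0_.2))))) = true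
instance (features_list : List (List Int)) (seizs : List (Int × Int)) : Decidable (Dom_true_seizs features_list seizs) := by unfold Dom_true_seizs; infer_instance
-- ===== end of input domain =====

-- B replaces A's nested rescan of all seizure pairs by a single dict pass that groups the flagged
-- indices per interval; each flagged segment is then compared only against the smallest other index
-- of its group.

-- ===== PORT A =====
-- inner 'for j' loop of A; 'cur' is the current value of res[i]; a 'break' returns cur
def trueSeizsInner (features_list : List (List Int)) (seizs : List (Int × Int))
    (i interv : Int) : List Int → Int → Int
  | [], cur => cur
  | j :: js, cur =>
    if (PySem.List.pyGetD seizs j (0, 0)).2 = interv ∧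
        (PySem.List.pyGetD seizs j (0, 0)).1 = 1 ∧ j ≠ i then
      if PySem.List.pyGetD (PySem.List.pyGetD features_list i []) 2 0 -
            PySem.List.pyGetD (PySem.List.pyGetD features_list i []) 1 0 <
          PySem.List.pyGetD (PySem.List.pyGetD features_list j []) 2 0 -
            PySem.List.pyGetD (PySem.List.pyGetD features_list j []) 1 0 then
        cur
      else trueSeizsInner features_list seizs i interv js 1
    else trueSeizsInner features_list seizs i interv js cur

def true_seizs (features_list : List (List Int)) (seizs : List (Int × Int)) : List Int :=
  (PySem.List.pyRange 0 (seizs.length : Int)).foldl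
    (fun res i =>
      if (PySem.List.pyGetD seizs i (0, 0)).1 = 1 then
        res.set i.toNat
          (trueSeizsInner features_list seizs i (PySem.List.pyGetD seizs i (0, 0)).2
            (PySem.List.pyRange 0 (seizs.length : Int)) (PySem.List.pyGetD res i 0))
      else res)
    (List.replicate seizs.length 0)

-- ===== PORT B =====
def true_seizs_alt (features_list : List (List Int)) (seizs : List (Int × Int)) : List Int :=
  let groups : PySem.Dict Int (List Int) :=
    (PySem.List.enumerate seizs).foldl
      (fun d p => if p.2.1 = 1 then d.modify p.2.2 [] (· ++ [p.1]) else d) PySem.Dict.empty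
  (PySem.List.enumerate seizs).foldl
    (fun res p =>
      res ++ [if p.2.1 = 1 then
          if 1 < (groups.getD p.2.2 []).length then
            if PySem.List.pyGetD
                  (PySem.List.pyGetD features_list
                    (if PySem.List.pyGetD (groups.getD p.2.2 []) 0 0 = p.1 then
                       PySem.List.pyGetD (groups.getD p.2.2 []) 1 0
                     else PySem.List.pyGetD (groups.getD p.2.2 []) 0 0) []) 2 0 -
                PySem.List.pyGetD
                  (PySem.List.pyGetD features_list
                    (if PySem.List.pyGetD (groups.getD p.2.2 []) 0 0 = p.1 then
                       PySem.List.pyGetD (groups.getD p.2.2 []) 1 0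
                     else PySem.List.pyGetD (groups.getD p.2.2 []) 0 0) []) 1 0 ≤
                PySem.List.pyGetD (PySem.List.pyGetD features_list p.1 []) 2 0 -
                PySem.List.pyGetD (PySem.List.pyGetD features_list p.1 []) 1 0 then 1 else 0
          else 0
        else 0])
    []

-- ===== PRECONDITION & SPEC =====
-- Pre_ excludes exactly the inputs on which A raises an IndexError: some flagged segment (val == 1)
-- that has another flagged segment in the same interval lacks a feature row with indices 1 and 2.
def Pre_true_seizs (features_list : List (List Int)) (seizs : List (Int × Int)) : Prop :=
  ∀ i < seizs.length,
    ((seizs.getD i (0, 0)).1 = 1 ∧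
      ∃ j < seizs.length, ¬ j = i ∧ (seizs.getD j (0, 0)).1 = 1 ∧
        (seizs.getD j (0, 0)).2 = (seizs.getD i (0, 0)).2) →
    i < features_list.length ∧ 3 ≤ (features_list.getD i []).length
instance (features_list : List (List Int)) (seizs : List (Int × Int)) : Decidable (Pre_true_seizs features_list seizs) := by unfold Pre_true_seizs; infer_instance
def pvWitness_true_seizs : List (List Int) × (List (Int × Int)) :=
  ([[0, 0, 1], [0, 0, 2]], [(1, 5), (1, 5)])

def Spec_true_seizs (features_list : List (List Int)) (seizs : List (Int × Int)) (out : List Int) : Prop := out = true_seizs_alt features_list seizs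
instance (features_list : List (List Int)) (seizs : List (Int × Int)) (out : List Int) : Decidable (Spec_true_seizs features_list seizs out) := by unfold Spec_true_seizs; infer_instance

-- ===== CLAIM (what is proved, stated in full; the proofs are below) =====
def Claim_equal_true_seizs : Prop := ∀ (features_list : List (List Int)) (seizs : List (Int × Int)), Dom_true_seizs features_list seizs → Pre_true_seizs features_list seizs → Spec_true_seizs features_list seizs (true_seizs features_list seizs)

-- ===== LEMMAS AND PROOFS =====
def pvDur (fl : List (List Int)) (i : Int) : Int :=
  PySem.List.pyGetD (PySem.List.pyGetD fl i []) 2 0 -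
    PySem.List.pyGetD (PySem.List.pyGetD fl i []) 1 0

def pvQ (seizs : List (Int × Int)) (k j : Nat) : Bool :=
  decide ((seizs.getD j (0, 0)).2 = (seizs.getD k (0, 0)).2) &&
    (decide ((seizs.getD j (0, 0)).1 = 1) && !decide (j = k))

def pvVal (fl : List (List Int)) (seizs : List (Int × Int)) (k : Nat) : Int :=
  if (seizs.getD k (0, 0)).1 = 1 then
    match ((List.range seizs.length).filter (pvQ seizs k)).head? with
    | none => 0
    | some j => if pvDur fl ↑k < pvDur fl ↑j then 0 else 1
  else 0

lemma pvInnerOne (fl : List (List Int)) (seizs : List (Int × Int)) (i interv : Int)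
    (js : List Int) : trueSeizsInner fl seizs i interv js 1 = 1 := by
  induction js with
  | nil => rfl
  | cons j js ih => simp only [trueSeizsInner]; split_ifs <;> simp [ih]

lemma pvInnerZero (fl : List (List Int)) (seizs : List (Int × Int)) (i interv : Int)
    (js : List Int) :
    trueSeizsInner fl seizs i interv js 0 =
      match js.find? (fun j => decide ((PySem.List.pyGetD seizs j (0, 0)).2 = interv ∧
          (PySem.List.pyGetD seizs j (0, 0)).1 = 1 ∧ j ≠ i)) with
      | none => 0
      | some j => if pvDur fl i < pvDur fl j then 0 else 1 := by
  induction js with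
  | nil => rfl
  | cons j js ih =>
    by_cases h : (PySem.List.pyGetD seizs j (0, 0)).2 = interv ∧
        (PySem.List.pyGetD seizs j (0, 0)).1 = 1 ∧ j ≠ i
    · rw [List.find?_cons_of_pos (h := by simpa using h)]
      simp only [trueSeizsInner, if_pos h, pvDur]
      split_ifs with h2
      · rfl
      · simp [pvInnerOne]
    · rw [List.find?_cons_of_neg (h := by simpa using h)]
      simpa only [trueSeizsInner, if_neg h] using ih

lemma pvInnerVal (fl : List (List Int)) (seizs : List (Int × Int)) (k : Nat) :
    trueSeizsInner fl seizs ↑k (seizs.getD k (0, 0)).2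
        (PySem.List.pyRange 0 (seizs.length : Int)) 0 =
      match ((List.range seizs.length).filter (pvQ seizs k)).head? with
      | none => 0
      | some j => if pvDur fl ↑k < pvDur fl ↑j then 0 else 1 := by
  rw [pvInnerZero, PySem.List.pyRange_zero_natCast, List.find?_map, List.head?_filter]
  have hpred :
      ((fun j => decide ((PySem.List.pyGetD seizs j (0, 0)).2 = (seizs.getD k (0, 0)).2 ∧
          (PySem.List.pyGetD seizs j (0, 0)).1 = 1 ∧ j ≠ (k : Int))) ∘ (fun k : Nat => (k : Int)))
        = pvQ seizs k := by
    funext j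
    simp [Function.comp, pvQ, PySem.List.pyGetD_natCast, Bool.decide_and, decide_not, Nat.cast_inj]
  rw [hpred]
  cases List.find? (pvQ seizs k) (List.range seizs.length) <;> rfl

lemma pvInnerVal' (fl : List (List Int)) (seizs : List (Int × Int)) (k : Nat) :
    trueSeizsInner fl seizs ↑k (seizs.getD k (0, 0)).2
        (List.map (fun k : Nat => (k : Int)) (List.range seizs.length)) 0 =
      match ((List.range seizs.length).filter (pvQ seizs k)).head? with
      | none => 0
      | some j => if pvDur fl ↑k < pvDur fl ↑j then 0 else 1 := by
  rw [← PySem.List.pyRange_zero_natCast]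
  exact pvInnerVal fl seizs k

lemma pvSelfMap (res : List Int) (n : Nat) (h : res.length = n) :
    (List.range n).map (fun k => res.getD k 0) = res := by
  subst h
  apply List.ext_getElem
  · simp
  · intro k h1 h2
    simp [List.getD_eq_getElem?_getD, h2]

lemma pvFoldA (fl : List (List Int)) (seizs : List (Int × Int)) (ks : List Nat)
    (res : List Int) (hnd : ks.Nodup) (hlt : ∀ k ∈ ks, k < seizs.length)
    (hlen : res.length = seizs.length) (h0 : ∀ k ∈ ks, res.getD k 0 = 0) :
    ks.foldl (fun res k =>
        if (seizs.getD k (0, 0)).1 = 1 then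
          res.set k (trueSeizsInner fl seizs ↑k (seizs.getD k (0, 0)).2
            (List.map (fun k : Nat => (k : Int)) (List.range seizs.length)) (res.getD k 0))
        else res) res =
      (List.range seizs.length).map
        (fun k => if k ∈ ks then pvVal fl seizs k else res.getD k 0) := by
  induction ks generalizing res with
  | nil =>
    rw [List.foldl_nil]
    conv_lhs => rw [← pvSelfMap res seizs.length hlen]
    apply List.map_congr_left
    intro k _
    simp
  | cons k0 ks ih =>
    have hk0 : k0 < seizs.length := hlt k0 (by simp)
    have hnd' : ks.Nodup := (List.nodup_cons.mp hnd).2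
    have hk0nmem : k0 ∉ ks := (List.nodup_cons.mp hnd).1
    rw [List.foldl_cons]
    have hstep : ∀ res' : List Int, res'.length = seizs.length →
        (∀ k ∈ ks, res'.getD k 0 = 0) →
        ks.foldl (fun res k =>
            if (seizs.getD k (0, 0)).1 = 1 then
              res.set k (trueSeizsInner fl seizs ↑k (seizs.getD k (0, 0)).2
                (List.map (fun k : Nat => (k : Int)) (List.range seizs.length)) (res.getD k 0))
            else res) res' =
          (List.range seizs.length).map
            (fun k => if k ∈ ks then pvVal fl seizs k else res'.getD k 0) :=
      fun res' h1 h2 => ih res' hnd' (fun k hk => hlt k (List.mem_cons_of_mem _ hk)) h1 h2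
    by_cases hv : (seizs.getD k0 (0, 0)).1 = 1
    · rw [if_pos hv, h0 k0 List.mem_cons_self, pvInnerVal']
      set v : Int := (match ((List.range seizs.length).filter (pvQ seizs k0)).head? with
        | none => 0
        | some j => if pvDur fl ↑k0 < pvDur fl ↑j then 0 else 1) with hvdef
      have hvval : v = pvVal fl seizs k0 := by rw [pvVal, if_pos hv]
      rw [hstep (res.set k0 v) (by simp [hlen]) (by
        intro k hk
        have hne : k0 ≠ k := fun h => hk0nmem (h ▸ hk)
        rw [List.getD_eq_getElem?_getD, List.getElem?_set_ne hne, ← List.getD_eq_getElem?_getD]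
        exact h0 k (List.mem_cons_of_mem _ hk))]
      apply List.map_congr_left
      intro k hkr
      have hkn : k < seizs.length := List.mem_range.mp hkr
      by_cases hmem : k ∈ ks
      · rw [if_pos hmem, if_pos (List.mem_cons_of_mem _ hmem)]
      · rw [if_neg hmem]
        by_cases hk0eq : k = k0
        · subst hk0eq
          rw [if_pos List.mem_cons_self]
          rw [List.getD_eq_getElem?_getD, List.getElem?_set_self (by omega)]
          simpa using hvval
        · rw [if_neg (by simp [hk0eq, hmem])]
          rw [List.getD_eq_getElem?_getD,
            List.getElem?_set_ne (fun h => hk0eq h.symm), ← List.getD_eq_getElem?_getD]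
    · rw [if_neg hv]
      rw [hstep res hlen (fun k hk => h0 k (List.mem_cons_of_mem _ hk))]
      apply List.map_congr_left
      intro k hkr
      by_cases hmem : k ∈ ks
      · rw [if_pos hmem, if_pos (List.mem_cons_of_mem _ hmem)]
      · rw [if_neg hmem]
        by_cases hk0eq : k = k0
        · subst hk0eq
          rw [if_pos List.mem_cons_self, h0 k List.mem_cons_self, pvVal, if_neg hv]
        · rw [if_neg (by simp [hk0eq, hmem])]

lemma pvA (fl : List (List Int)) (seizs : List (Int × Int)) :
    true_seizs fl seizs = (List.range seizs.length).map (pvVal fl seizs) := by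
  unfold true_seizs
  rw [PySem.List.pyRange_zero_natCast, List.foldl_map]
  simp only [PySem.List.pyGetD_natCast, Int.toNat_natCast]
  rw [pvFoldA fl seizs (List.range seizs.length) _ (List.nodup_range)
    (fun k hk => List.mem_range.mp hk) (by simp) (by intro k hk; rcases Nat.lt_or_ge k seizs.length with h|h <;> simp [List.getD_eq_getElem?_getD, h])]
  apply List.map_congr_left
  intro k hk
  rw [if_pos hk]

lemma pvGroups (seizs : List (Int × Int)) (c : Int) :
    ((PySem.List.enumerate seizs).foldl
        (fun d p => if p.2.1 = 1 then d.modify p.2.2 [] (· ++ [p.1]) else d)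
        PySem.Dict.empty).getD c [] =
      List.map (fun k : Nat => (k : Int)) ((List.range seizs.length).filter
          (fun k => decide ((seizs.getD k (0, 0)).1 = 1) &&
            decide ((seizs.getD k (0, 0)).2 = c))) := by
  rw [PySem.List.foldl_ite_eq_foldl_filter (p := fun p : Int × (Int × Int) => p.2.1 = 1)
    (f := fun d p => PySem.Dict.modify d p.2.2 [] (· ++ [p.1]))]
  rw [← List.foldl_map (f := fun p : Int × (Int × Int) => (p.2.2, p.1))
    (g := fun d q => PySem.Dict.modify d q.1 [] (· ++ [q.2]))]
  rw [PySem.Dict.getD_foldl_modify_append]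
  rw [PySem.List.enumerate_eq_map_pyRange seizs (0, 0), PySem.List.len,
    PySem.List.pyRange_zero_natCast]
  simp [List.filter_map, List.map_map, Function.comp, PySem.List.pyGetD_natCast,
    List.filter_filter]
  have hf : (fun a : Nat => (seizs[a]?.getD (0, 0)).2 == c && decide ((seizs[a]?.getD (0, 0)).1 = 1))
      = (fun k : Nat => decide ((seizs[k]?.getD (0, 0)).1 = 1) && decide ((seizs[k]?.getD (0, 0)).2 = c)) := by
    funext a
    rw [Bool.and_comm, Bool.beq_eq_decide_eq]
  rw [hf]
  exact List.map_congr_left fun a _ => rfl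

lemma pvBridge (l : List Nat) (i : Nat) (hnd : l.Nodup) (hi : i ∈ l) :
    (l.filter (fun k => !decide (k = i))).head? =
      if 1 < l.length then some (if l.getD 0 0 = i then l.getD 1 0 else l.getD 0 0)
      else none := by
  match l with
  | [] => simp at hi
  | [a] =>
    have : a = i := (by simpa using hi : i = a).symm
    simp [this]
  | a :: b :: t =>
    simp only [List.length_cons] at *
    rw [if_pos (by omega)]
    by_cases hai : a = i
    · subst hai
      have hno : a ∉ b :: t := (List.nodup_cons.mp hnd).1
      rw [List.filter_cons_of_neg (by simp)]
      rw [List.filter_eq_self.mpr ?_]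
      · simp
      · intro x hx
        simp only [Bool.not_eq_true', decide_eq_false_iff_not]
        exact fun hxa => hno (hxa ▸ hx)
    · rw [List.filter_cons_of_pos (by simpa using hai)]
      simp [hai]

lemma pvB (fl : List (List Int)) (seizs : List (Int × Int)) :
    true_seizs_alt fl seizs = (List.range seizs.length).map (pvVal fl seizs) := by
  unfold true_seizs_alt
  rw [PySem.List.foldl_append_singleton_eq_map, List.nil_append]
  simp only [pvGroups]
  rw [PySem.List.enumerate_eq_map_pyRange seizs (0, 0), PySem.List.len,
    PySem.List.pyRange_zero_natCast, List.map_map, List.map_map]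
  apply List.map_congr_left
  intro k hk
  have hkn : k < seizs.length := List.mem_range.mp hk
  simp only [Function.comp]
  simp only [PySem.List.pyGetD_natCast]
  by_cases hv : (seizs.getD k (0, 0)).1 = 1
  · rw [if_pos hv, pvVal, if_pos hv]
    set gN : List Nat := (List.range seizs.length).filter
      (fun j => decide ((seizs.getD j (0, 0)).1 = 1) &&
        decide ((seizs.getD j (0, 0)).2 = (seizs.getD k (0, 0)).2)) with hgN
    have hknd : gN.Nodup := List.nodup_range.filter _
    have hkg : k ∈ gN := by
      rw [hgN, List.mem_filter]
      refine ⟨hk, ?_⟩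
      rw [Bool.and_eq_true, decide_eq_true_eq, decide_eq_true_eq]
      exact ⟨hv, rfl⟩
    have hfilt : (List.range seizs.length).filter (pvQ seizs k)
        = gN.filter (fun j => !decide (j = k)) := by
      rw [hgN, List.filter_filter]
      apply List.filter_congr
      intro j _
      simp [pvQ, Bool.and_comm, Bool.and_assoc]
    rw [hfilt, pvBridge gN k hknd hkg]
    by_cases hlen : 1 < gN.length
    · rw [if_pos (by simpa using hlen), if_pos hlen]
      have h0lt : 0 < gN.length := by omega
      have hget0 : PySem.List.pyGetD (List.map (fun k : Nat => (k : Int)) gN) 0 0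
          = ((gN.getD 0 0 : Nat) : Int) := by
        rw [PySem.List.pyGetD_ofNat']
        rw [List.getD_eq_getElem?_getD, List.getElem?_map,
          List.getElem?_eq_getElem (by simpa using h0lt), List.getD_eq_getElem?_getD,
          List.getElem?_eq_getElem h0lt]
        rfl
      have hget1 : PySem.List.pyGetD (List.map (fun k : Nat => (k : Int)) gN) 1 0
          = ((gN.getD 1 0 : Nat) : Int) := by
        rw [PySem.List.pyGetD_ofNat']
        rw [List.getD_eq_getElem?_getD, List.getElem?_map,
          List.getElem?_eq_getElem (by simpa using hlen), List.getD_eq_getElem?_getD,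
          List.getElem?_eq_getElem hlen]
        rfl
      rw [hget0, hget1]
      set j0 : Nat := if gN.getD 0 0 = k then gN.getD 1 0 else gN.getD 0 0 with hj0
      have hother : (if ((gN.getD 0 0 : Nat) : Int) = ((k : Nat) : Int)
          then ((gN.getD 1 0 : Nat) : Int) else ((gN.getD 0 0 : Nat) : Int)) = ((j0 : Nat) : Int) := by
        rw [hj0]
        by_cases he : gN.getD 0 0 = k
        · rw [if_pos (by exact_mod_cast he), if_pos he]
        · rw [if_neg (by exact_mod_cast he), if_neg he]
      rw [hother]
      by_cases hcmp : pvDur fl ↑k < pvDur fl ↑j0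
      · rw [if_neg (by simp only [pvDur, PySem.List.pyGetD_natCast] at hcmp ⊢; omega)]
        exact (if_pos hcmp).symm
      · rw [if_pos (by simp only [pvDur, PySem.List.pyGetD_natCast] at hcmp ⊢; omega)]
        exact (if_neg hcmp).symm
    · rw [if_neg (by simpa using hlen), if_neg hlen]
  · rw [if_neg hv, pvVal, if_neg hv]

-- ===== VERDICT (by name: the statement is the Claim_ definition above) =====
theorem true_seizs_spec : Claim_equal_true_seizs := by
  intro fl seizs _ _
  unfold Spec_true_seizs
  rw [pvA, pvB]
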